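-- pv_equiv track=rewrite | github.com/franciszver/GChallenges | Challenges/unordered_escape.py | buildGCDMatrix
-- ===== SOURCE A (Python) =====
-- def buildGCDMatrix(m):
--     # Build a matrix with a size less than max number
--
--     # Initial size setup
--     matrix = [[0 for x in range(m)] for y in range(m)]
--
--     # Populate
--     for i in range(m):
--         for j in range(i, m):
--             if i == 0 or j == 0:
--                 matrix[i][j] = 1
--                 matrix[j][i] = 1
--             elif i == j:
--                 matrix[i][j] = i+1
--             else:
--                 matrix[i][j] = matrix[i][j-i-1]
--                 matrix[j][i] = matrix[i][j-i-1]
--     return matrix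
-- ===== SOURCE B (Python) =====
-- def buildGCDMatrix(m):
--     # Largest-common-divisor sieve: start from all ones; for each d = 2..m overwrite
--     # every cell whose row and column (1-based) are both multiples of d with d.
--     # The last d written to a cell is the largest common divisor, i.e. the gcd.
--     matrix = [[1] * m for _ in range(m)]
--     for d in range(2, m + 1):
--         cnt = (m - d) // d + 1
--         fill = [d] * cnt
--         for i in range(d - 1, m, d):
--             matrix[i][d - 1::d] = fill
--     return matrix
-- ===== Notes on version B (the rewrite author's own statement) =====
-- stated objective: alternative
-- what changed: Replaces the DP table with its data-dependent subtractive recurrence and mirroring by a common-divisor sieve: start from an all-ones matrix and for each d = 2..m overwrite all cells whose one-based row and column are both multiples of d with d, using strided slice assignment.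
import Mathlib
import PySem

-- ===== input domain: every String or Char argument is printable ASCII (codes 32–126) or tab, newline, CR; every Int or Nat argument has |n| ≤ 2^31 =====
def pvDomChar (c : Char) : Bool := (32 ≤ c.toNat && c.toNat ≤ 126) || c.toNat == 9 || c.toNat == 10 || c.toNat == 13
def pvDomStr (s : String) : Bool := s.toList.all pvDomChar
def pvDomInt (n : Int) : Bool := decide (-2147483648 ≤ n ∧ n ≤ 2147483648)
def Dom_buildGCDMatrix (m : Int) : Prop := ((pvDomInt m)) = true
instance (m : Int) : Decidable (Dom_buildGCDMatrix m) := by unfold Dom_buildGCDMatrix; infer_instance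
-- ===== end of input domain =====

-- B replaces A's DP table with its data-dependent subtractive recurrence by a
-- largest-common-divisor sieve (all ones, then for d = 2..m overwrite cells whose
-- 1-based row and column are both multiples of d); objective: alternative algorithm.

-- ===== PORT A =====
-- Python's `matrix[a][b]` read / element assignment: indices here are always nonnegative and
-- in range, where List.getD / List.set are exact.
def pvGetCell (mat : List (List Int)) (a b : Nat) : Int := (mat.getD a []).getD b 0
def pvSetCell (mat : List (List Int)) (a b : Nat) (v : Int) : List (List Int) :=
  mat.set a ((mat.getD a []).set b v)

-- body of the inner `for j in range(i, m)` loop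
def pvInnerBody (i : Nat) (mat : List (List Int)) (j : Nat) : List (List Int) :=
  if i = 0 ∨ j = 0 then
    pvSetCell (pvSetCell mat i j 1) j i 1
  else if i = j then
    pvSetCell mat i j ((i : Int) + 1)
  else
    pvSetCell (pvSetCell mat i j (pvGetCell mat i (j - i - 1))) j i (pvGetCell mat i (j - i - 1))

-- body of the outer `for i in range(m)` loop
def pvOuterBody (n : Nat) (mat : List (List Int)) (i : Nat) : List (List Int) :=
  (List.range' i (n - i)).foldl (pvInnerBody i) mat

def buildGCDMatrix (m : Int) : List (List Int) :=
  -- range(m) for an Int m has m.toNat elements 0,1,…  (empty for m ≤ 0): exact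
  let n := m.toNat
  let matrix := (List.range n).map (fun _ => (List.range n).map (fun _ => (0 : Int)))
  (List.range n).foldl (pvOuterBody n) matrix

-- ===== PORT B =====
-- Source B's strided slice assignment `matrix[i][d-1::d] = [d]*cnt`: sets the cnt
-- positions d-1, 2d-1, … of the row (cnt equals the slice's length here); exact.
def pvFillRow (d cnt : Nat) (row : List Int) : List Int :=
  (List.range' (d - 1) cnt d).foldl (fun r idx => r.set idx (d : Int)) row

-- body of Source B's `for d in range(2, m+1)` loop (rows i = d-1, 2d-1, … get their slice assigned)
def pvSieveStep (n : Nat) (mat : List (List Int)) (d : Nat) : List (List Int) :=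
  (List.range' (d - 1) ((n - d) / d + 1) d).foldl
    (fun mat i => mat.set i (pvFillRow d ((n - d) / d + 1) (mat.getD i []))) mat

def buildGCDMatrix_alt (m : Int) : List (List Int) :=
  -- `[[1]*m for _ in range(m)]`, then the sieve loop `for d in range(2, m+1)`
  (List.range' 2 (m.toNat - 1)).foldl (pvSieveStep m.toNat)
    ((List.range m.toNat).map (fun _ => (List.range m.toNat).map (fun _ => (1 : Int))))

-- ===== PRECONDITION & SPEC =====
def Spec_buildGCDMatrix (m : Int) (out : List (List Int)) : Prop := out = buildGCDMatrix_alt m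
instance (m : Int) (out : List (List Int)) : Decidable (Spec_buildGCDMatrix m out) := by unfold Spec_buildGCDMatrix; infer_instance

-- ===== CLAIM (what is proved, stated in full; the proofs are below) =====
def Claim_equal_buildGCDMatrix : Prop := ∀ (m : Int), Dom_buildGCDMatrix m → Spec_buildGCDMatrix m (buildGCDMatrix m)

-- ===== LEMMAS AND PROOFS =====

-- the ideal n×n matrix whose cell (a,b) is c a b
def pvMatD (n : Nat) (c : Nat → Nat → Int) : List (List Int) :=
  (List.range n).map (fun a => (List.range n).map (c a))

def pvG (a b : Nat) : Int := (Nat.gcd (a + 1) (b + 1) : Int)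

-- the matrix contents after A has fully processed rows 0..i-1 and, within row i,
-- inner indices i..j0-1 (each inner step also writes the mirrored cell)
def pvCell (i j0 : Nat) (a b : Nat) : Int :=
  if min a b < i ∨ (a = i ∧ i ≤ b ∧ b < j0) ∨ (b = i ∧ i ≤ a ∧ a < j0) then pvG a b else 0

theorem pvG_comm (a b : Nat) : pvG a b = pvG b a := by
  simp [pvG, Nat.gcd_comm]

theorem pvG_step (i j : Nat) (h : i < j) : pvG i (j - i - 1) = pvG i j := by
  simp only [pvG]
  have h1 : j - i - 1 + 1 = (j + 1) - (i + 1) := by omega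
  rw [h1, Nat.gcd_sub_self_right (by omega)]

theorem set_map_range {α : Type} (n a : Nat) (f : Nat → α) (v : α) (ha : a < n) :
    ((List.range n).map f).set a v = (List.range n).map (fun x => if x = a then v else f x) := by
  apply List.ext_getElem
  · simp
  · intro i h1 h2
    simp only [List.getElem_set, List.getElem_map, List.getElem_range]
    rcases eq_or_ne a i with h | h
    · subst h; simp
    · rw [if_neg h, if_neg (Ne.symm h)]

theorem matD_congr (n : Nat) (c c' : Nat → Nat → Int)
    (h : ∀ a, a < n → ∀ b, b < n → c a b = c' a b) : pvMatD n c = pvMatD n c' := by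
  unfold pvMatD
  apply List.map_congr_left
  intro a ha
  apply List.map_congr_left
  intro b hb
  exact h a (List.mem_range.mp ha) b (List.mem_range.mp hb)

theorem getD_matD (n : Nat) (c : Nat → Nat → Int) (a : Nat) (ha : a < n) :
    (pvMatD n c).getD a [] = (List.range n).map (c a) := by
  rw [List.getD_eq_getElem _ _ (by simp [pvMatD, ha])]
  simp [pvMatD]

theorem getCell_matD (n : Nat) (c : Nat → Nat → Int) (a b : Nat) (ha : a < n) (hb : b < n) :
    pvGetCell (pvMatD n c) a b = c a b := by
  rw [pvGetCell, getD_matD n c a ha, List.getD_eq_getElem _ _ (by simpa)]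
  simp

theorem setCell_matD (n : Nat) (c : Nat → Nat → Int) (a b : Nat) (v : Int) (ha : a < n) (hb : b < n) :
    pvSetCell (pvMatD n c) a b v
      = pvMatD n (fun x y => if x = a then (if y = b then v else c a y) else c x y) := by
  rw [pvSetCell, getD_matD n c a ha, set_map_range n b (c a) v hb]
  conv_lhs => rw [pvMatD, set_map_range n a _ _ ha]
  unfold pvMatD
  apply List.map_congr_left
  intro x _
  by_cases hx : x = a
  · simp [hx]
  · simp [hx]

theorem inner_step (n i j : Nat) (hij : i ≤ j) (hj : j < n) :
    pvInnerBody i (pvMatD n (pvCell i j)) j = pvMatD n (pvCell i (j + 1)) := by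
  have hi : i < n := lt_of_le_of_lt hij hj
  unfold pvInnerBody
  by_cases h0 : i = 0 ∨ j = 0
  · have hi0 : i = 0 := by omega
    rw [if_pos h0, setCell_matD n _ i j 1 hi hj, setCell_matD n _ j i 1 hj hi]
    apply matD_congr
    intro a ha b hb
    subst hi0
    simp only [pvCell]
    split_ifs <;>
      first
        | rfl
        | omega
        | (simp_all [pvG, Nat.gcd_one_left, Nat.gcd_one_right] <;> omega)
  · by_cases hd : i = j
    · rw [if_neg h0, if_pos hd, setCell_matD n _ i j _ hi hj]
      apply matD_congr
      intro a ha b hb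
      simp only [pvCell]
      subst hd
      split_ifs <;>
        first
          | rfl
          | omega
          | (simp_all [pvG, Nat.gcd_self] <;> omega)
    · have hlt : i < j := by omega
      rw [if_neg h0, if_neg hd]
      have hread : pvGetCell (pvMatD n (pvCell i j)) i (j - i - 1) = pvG i j := by
        rw [getCell_matD n _ i (j - i - 1) hi (by omega)]
        rw [pvCell, if_pos (by omega)]
        exact pvG_step i j hlt
      rw [hread, setCell_matD n _ i j _ hi hj, setCell_matD n _ j i _ hj hi]
      apply matD_congr
      intro a ha b hb
      simp only [pvCell]
      split_ifs <;>
        first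
          | rfl
          | omega
          | (simp_all <;> first | omega | exact pvG_comm i j | exact (pvG_comm i j).symm | exact pvG_comm j i | exact (pvG_comm j i).symm)

theorem inner_fold (n i : Nat) : ∀ (k j : Nat), i ≤ j → j + k ≤ n →
    (List.range' j k).foldl (pvInnerBody i) (pvMatD n (pvCell i j)) = pvMatD n (pvCell i (j + k)) := by
  intro k
  induction k with
  | zero => intro j _ _; simp
  | succ k ih =>
      intro j hij hk
      have h2 : j + 1 + k = j + (k + 1) := by omega
      rw [List.range'_succ, List.foldl_cons, inner_step n i j hij (by omega),
          ih (j + 1) (by omega) (by omega), h2]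

theorem outer_step (n i : Nat) (hi : i < n) :
    pvOuterBody n (pvMatD n (pvCell i i)) i = pvMatD n (pvCell (i + 1) (i + 1)) := by
  unfold pvOuterBody
  rw [inner_fold n i (n - i) i (le_refl i) (by omega)]
  have h1 : i + (n - i) = n := by omega
  rw [h1]
  apply matD_congr
  intro a ha b hb
  simp only [pvCell]
  split_ifs <;> first | rfl | omega

theorem outer_fold (n : Nat) : ∀ (k : Nat), k ≤ n →
    (List.range k).foldl (pvOuterBody n) (pvMatD n (pvCell 0 0)) = pvMatD n (pvCell k k) := by
  intro k
  induction k with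
  | zero => intro _; simp
  | succ k ih =>
      intro hk
      rw [List.range_succ, List.foldl_append, ih (by omega), List.foldl_cons, List.foldl_nil,
          outer_step n k (by omega)]

theorem init_eq (n : Nat) :
    (List.range n).map (fun _ => (List.range n).map (fun _ => (0 : Int))) = pvMatD n (pvCell 0 0) := by
  unfold pvMatD
  apply List.map_congr_left
  intro a _
  apply List.map_congr_left
  intro b _
  rw [pvCell, if_neg (by omega)]

theorem final_eq (n : Nat) : pvMatD n (pvCell n n) = pvMatD n pvG := by
  apply matD_congr
  intro a ha b hb
  rw [pvCell, if_pos (by omega)]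

-- ----- B side: the sieve also produces the gcd matrix -----

-- cell value after sieve passes d = 2..D: the largest e ≤ D dividing both a+1 and b+1
def pvSC (D a b : Nat) : Int := (Nat.findGreatest (fun e => e ∣ (a + 1) ∧ e ∣ (b + 1)) D : Nat)

theorem setRow_matD (n a : Nat) (c : Nat → Nat → Int) (g : Nat → Int) (ha : a < n) :
    (pvMatD n c).set a ((List.range n).map g)
      = pvMatD n (fun x y => if x = a then g y else c x y) := by
  conv_lhs => rw [pvMatD, set_map_range n a _ _ ha]
  unfold pvMatD
  apply List.map_congr_left
  intro x _
  by_cases hx : x = a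
  · simp [hx]
  · simp [hx]

theorem fold_set_map (n : Nat) (v : Int) :
    ∀ (L : List Nat) (f : Nat → Int), (∀ x ∈ L, x < n) →
      L.foldl (fun r idx => r.set idx v) ((List.range n).map f)
        = (List.range n).map (fun y => if y ∈ L then v else f y) := by
  intro L
  induction L with
  | nil => intro f _; simp
  | cons a L ih =>
      intro f hL
      rw [List.foldl_cons, set_map_range n a f v (hL a (by simp)),
          ih _ (fun x hx => hL x (by simp [hx]))]
      apply List.map_congr_left
      intro y _
      by_cases h1 : y ∈ L <;> by_cases h2 : y = a <;> simp [h1, h2]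

theorem rows_fold (n d cnt : Nat)
    (hcol : ∀ x ∈ List.range' (d - 1) cnt d, x < n) :
    ∀ (L : List Nat) (c : Nat → Nat → Int), (∀ x ∈ L, x < n) →
      L.foldl (fun mat i => mat.set i (pvFillRow d cnt (mat.getD i []))) (pvMatD n c)
        = pvMatD n (fun x y =>
            if x ∈ L then (if y ∈ List.range' (d - 1) cnt d then (d : Int) else c x y) else c x y) := by
  intro L
  induction L with
  | nil =>
      intro c _
      simp only [List.foldl_nil]
      apply matD_congr
      intro a _ b _
      simp
  | cons a L ih =>
      intro c hL
      rw [List.foldl_cons, getD_matD n c a (hL a (by simp)), pvFillRow,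
          fold_set_map n (d : Int) _ (c a) hcol, setRow_matD n a c _ (hL a (by simp)),
          ih _ (fun x hx => hL x (by simp [hx]))]
      apply matD_congr
      intro x _ y _
      by_cases h1 : x ∈ L <;> by_cases h2 : x = a <;>
        by_cases h3 : y ∈ List.range' (d - 1) cnt d <;> simp [h1, h2, h3]

theorem mem_colIdx (n d y : Nat) (hdn : d ≤ n) (hd : 1 ≤ d) (hy : y < n) :
    y ∈ List.range' (d - 1) ((n - d) / d + 1) d ↔ d ∣ (y + 1) := by
  rw [List.mem_range']
  constructor
  · rintro ⟨i, _, rfl⟩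
    exact ⟨i + 1, by have : d * (i + 1) = d * i + d := by ring
                     omega⟩
  · rintro ⟨k, hk⟩
    have hk1 : 1 ≤ k := by
      rcases Nat.eq_zero_or_pos k with h | h
      · subst h; omega
      · exact h
    have hmul : d * (k - 1) + d = d * k := by
      have : d * (k - 1) + d = d * (k - 1 + 1) := by ring
      rw [this]; congr 1; omega
    refine ⟨k - 1, ?_, by omega⟩
    have hdk : d * k ≤ n := by omega
    have h2 : (k - 1) * d ≤ n - d := by
      rw [Nat.mul_comm]; omega
    have := (Nat.le_div_iff_mul_le (by omega : 0 < d)).mpr h2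
    omega

theorem colIdx_lt (n d : Nat) (hdn : d ≤ n) (hd : 1 ≤ d) :
    ∀ x ∈ List.range' (d - 1) ((n - d) / d + 1) d, x < n := by
  intro x hx
  rw [List.mem_range'] at hx
  obtain ⟨i, hi, rfl⟩ := hx
  have h1 : i ≤ (n - d) / d := by omega
  have h2 : i * d ≤ n - d := (Nat.le_div_iff_mul_le (by omega : 0 < d)).mp h1
  have : d * i = i * d := by ring
  omega

theorem pvSC_step (d a b : Nat) (hd : 1 ≤ d) :
    pvSC d a b = if d ∣ (a + 1) ∧ d ∣ (b + 1) then (d : Int) else pvSC (d - 1) a b := by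
  obtain ⟨k, rfl⟩ : ∃ k, d = k + 1 := ⟨d - 1, by omega⟩
  rw [pvSC, Nat.findGreatest_succ]
  by_cases h : (k + 1) ∣ (a + 1) ∧ (k + 1) ∣ (b + 1)
  · rw [if_pos h, if_pos h]
  · rw [if_neg h, if_neg h]; rfl

theorem sieve_step (n d : Nat) (hd2 : 2 ≤ d) (hdn : d ≤ n) :
    pvSieveStep n (pvMatD n (pvSC (d - 1))) d = pvMatD n (pvSC d) := by
  have hcol := colIdx_lt n d hdn (by omega)
  rw [pvSieveStep, rows_fold n d _ hcol _ (pvSC (d - 1)) hcol]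
  apply matD_congr
  intro x hx y hy
  rw [pvSC_step d x y (by omega)]
  by_cases hx1 : d ∣ (x + 1) <;> by_cases hy1 : d ∣ (y + 1)
  · rw [if_pos ((mem_colIdx n d x hdn (by omega) hx).mpr hx1),
        if_pos ((mem_colIdx n d y hdn (by omega) hy).mpr hy1), if_pos ⟨hx1, hy1⟩]
  · rw [if_pos ((mem_colIdx n d x hdn (by omega) hx).mpr hx1),
        if_neg (fun h => hy1 ((mem_colIdx n d y hdn (by omega) hy).mp h)),
        if_neg (fun h => hy1 h.2)]
  · rw [if_neg (fun h => hx1 ((mem_colIdx n d x hdn (by omega) hx).mp h)),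
        if_neg (fun h => hx1 h.1)]
  · rw [if_neg (fun h => hx1 ((mem_colIdx n d x hdn (by omega) hx).mp h)),
        if_neg (fun h => hx1 h.1)]

theorem sieve_fold (n : Nat) : ∀ k, k ≤ n - 1 →
    (List.range' 2 k).foldl (pvSieveStep n) (pvMatD n (pvSC 1)) = pvMatD n (pvSC (k + 1)) := by
  intro k
  induction k with
  | zero => intro _; simp
  | succ k ih =>
      intro hk
      have h1 : 2 + 1 * k = k + 2 := by omega
      have h2 : k + 2 - 1 = k + 1 := by omega
      rw [List.range'_concat, List.foldl_append, ih (by omega), h1, List.foldl_cons,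
          List.foldl_nil, ← h2, sieve_step n (k + 2) (by omega) (by omega), h2]

theorem init_sC (n : Nat) :
    (List.range n).map (fun _ => (List.range n).map (fun _ => (1 : Int))) = pvMatD n (pvSC 1) := by
  unfold pvMatD
  apply List.map_congr_left
  intro a _
  apply List.map_congr_left
  intro b _
  rw [pvSC, Nat.findGreatest_succ, if_pos ⟨Nat.one_dvd _, Nat.one_dvd _⟩]
  norm_num

theorem sC_final (n a b : Nat) (ha : a < n) (hb : b < n) : pvSC n a b = pvG a b := by
  have hgpos : 0 < Nat.gcd (a + 1) (b + 1) := Nat.gcd_pos_of_pos_left _ (Nat.succ_pos a)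
  have hgle : Nat.gcd (a + 1) (b + 1) ≤ n :=
    le_trans (Nat.le_of_dvd (Nat.succ_pos a) (Nat.gcd_dvd_left _ _)) (by omega)
  rw [pvSC, pvG]
  congr 1
  apply le_antisymm
  · have hp := Nat.findGreatest_spec (P := fun e => e ∣ (a + 1) ∧ e ∣ (b + 1))
      (m := 1) (n := n) (by omega) ⟨Nat.one_dvd _, Nat.one_dvd _⟩
    exact Nat.le_of_dvd hgpos (Nat.dvd_gcd hp.1 hp.2)
  · exact Nat.le_findGreatest hgle ⟨Nat.gcd_dvd_left _ _, Nat.gcd_dvd_right _ _⟩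

theorem alt_eq (m : Int) : buildGCDMatrix_alt m = pvMatD m.toNat pvG := by
  unfold buildGCDMatrix_alt
  rw [init_sC, sieve_fold m.toNat (m.toNat - 1) (le_refl _)]
  rcases Nat.eq_zero_or_pos m.toNat with h | h
  · rw [h]; rfl
  · have h1 : m.toNat - 1 + 1 = m.toNat := by omega
    rw [h1]
    apply matD_congr
    intro a ha b hb
    exact sC_final m.toNat a b ha hb

-- ===== VERDICT (by name: the statement is the Claim_ definition above) =====
theorem buildGCDMatrix_spec : Claim_equal_buildGCDMatrix := by
  intro m _
  unfold Spec_buildGCDMatrix buildGCDMatrix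
  show (List.range m.toNat).foldl (pvOuterBody m.toNat)
      ((List.range m.toNat).map (fun _ => (List.range m.toNat).map (fun _ => (0 : Int)))) = _
  rw [init_eq, outer_fold m.toNat m.toNat (le_refl _), final_eq, alt_eq]
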